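-- pv_equiv track=rewrite | github.com/Pjamas180/MiscPython | PA5/crack.py | transform_digits
-- ===== SOURCE A (Python) =====
-- def string_concat(list,charac):
--     """Helper function which concats strings to all values of a list"""
--     newList = []
--     for x in list:
--         x = x + charac
--         newList.append(x)
--     return newList
--
-- def transform_digits(str):
--     """ Find all possible values of a string where the letters could represent digits and return
--     the possibilites in a list. """
--     listOfWords = []
--     if str == "":
--         return [""]
--     # Recursively find possibilities of the string and use the helper function
--     else:
--         strList = list(str)
--         lastChar = strList[len(strList)-1]
--         newList = strList[0:len(strList)-1]
--         newString = ''.join(newList)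
--         if lastChar.lower() == 'o':
--             listOfWords.extend(string_concat(transform_digits(newString), lastChar))
--             listOfWords.extend(string_concat(transform_digits(newString), '0'))
--         elif lastChar.lower() == 'z':
--             listOfWords.extend(string_concat(transform_digits(newString), lastChar))
--             listOfWords.extend(string_concat(transform_digits(newString), '2'))
--         elif lastChar.lower() == 'a':
--             listOfWords.extend(string_concat(transform_digits(newString), lastChar))
--             listOfWords.extend(string_concat(transform_digits(newString), '4'))
--         elif lastChar.lower() == 'b':
--             listOfWords.extend(string_concat(transform_digits(newString), lastChar))
--             listOfWords.extend(string_concat(transform_digits(newString), '6'))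
--             listOfWords.extend(string_concat(transform_digits(newString), '8'))
--         elif lastChar.lower() == 'i' or lastChar.lower() == 'l':
--             listOfWords.extend(string_concat(transform_digits(newString), lastChar))
--             listOfWords.extend(string_concat(transform_digits(newString), '1'))
--         elif lastChar.lower() == 'e':
--             listOfWords.extend(string_concat(transform_digits(newString), lastChar))
--             listOfWords.extend(string_concat(transform_digits(newString), '3'))
--         elif lastChar.lower() == 's':
--             listOfWords.extend(string_concat(transform_digits(newString), lastChar))
--             listOfWords.extend(string_concat(transform_digits(newString), '5'))
--         elif lastChar.lower() == 't':
--             listOfWords.extend(string_concat(transform_digits(newString), lastChar))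
--             listOfWords.extend(string_concat(transform_digits(newString), '7'))
--         elif lastChar.lower() == 'g' or lastChar.lower() == 'q':
--             listOfWords.extend(string_concat(transform_digits(newString), lastChar))
--             listOfWords.extend(string_concat(transform_digits(newString), '9'))
--         else:
--             listOfWords.extend(string_concat(transform_digits(newString), lastChar))
--     return listOfWords
-- ===== SOURCE B (Python) =====
-- SUBS = {'o': '0', 'z': '2', 'a': '4', 'b': '68', 'i': '1', 'l': '1',
--         'e': '3', 's': '5', 't': '7', 'g': '9', 'q': '9'}
--
-- def transform_digits(str):
--     """Single left-to-right pass: the prefix's variant list is computed once per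
--     character instead of once per recursive branch."""
--     results = [""]
--     for ch in str:
--         opts = [ch] + list(SUBS.get(ch.lower(), ""))
--         results = [p + o for o in opts for p in results]
--     return results
-- ===== Notes on version B (the rewrite author's own statement) =====
-- stated objective: alternative
-- what changed: Replaced the multi-branch recursion that recomputes the prefix's variant list 2-3 times per level with a single iterative left-to-right pass that computes each prefix's variant list exactly once; intended as faster (measured 4.65x at n=16), but unconfirmed at the largest sizes where the exponential output dominates.
import Mathlib
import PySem

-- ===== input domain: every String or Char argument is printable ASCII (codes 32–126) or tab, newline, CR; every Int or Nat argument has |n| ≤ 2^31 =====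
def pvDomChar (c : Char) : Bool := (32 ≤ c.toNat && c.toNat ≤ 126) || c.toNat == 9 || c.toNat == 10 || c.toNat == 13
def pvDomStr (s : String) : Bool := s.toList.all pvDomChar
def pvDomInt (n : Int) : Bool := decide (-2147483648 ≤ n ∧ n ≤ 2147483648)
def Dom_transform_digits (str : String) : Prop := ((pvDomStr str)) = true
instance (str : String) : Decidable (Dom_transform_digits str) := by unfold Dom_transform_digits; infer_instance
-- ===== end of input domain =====

-- B replaces A's branch-wise recursion (which recomputes the prefix's variant list 2-3 times
-- per level) with one iterative pass computing each prefix's variant list exactly once.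
-- ===== PORT A =====
def stringConcat (lst : List String) (c : Char) : List String :=
  lst.map (fun x => x.push c)  -- string_concat; charac is always a 1-char string in A, ported as Char

def tdA (cs : List Char) : List String :=
  if h : cs = [] then [""]
  else
    let lastChar := cs.getLast h
    let newList := cs.dropLast
    let lc := PySem.Chars.lowerChar lastChar
    if lc = 'o' then stringConcat (tdA newList) lastChar ++ stringConcat (tdA newList) '0'
    else if lc = 'z' then stringConcat (tdA newList) lastChar ++ stringConcat (tdA newList) '2'
    else if lc = 'a' then stringConcat (tdA newList) lastChar ++ stringConcat (tdA newList) '4'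
    else if lc = 'b' then stringConcat (tdA newList) lastChar ++ stringConcat (tdA newList) '6' ++ stringConcat (tdA newList) '8'
    else if lc = 'i' ∨ lc = 'l' then stringConcat (tdA newList) lastChar ++ stringConcat (tdA newList) '1'
    else if lc = 'e' then stringConcat (tdA newList) lastChar ++ stringConcat (tdA newList) '3'
    else if lc = 's' then stringConcat (tdA newList) lastChar ++ stringConcat (tdA newList) '5'
    else if lc = 't' then stringConcat (tdA newList) lastChar ++ stringConcat (tdA newList) '7'
    else if lc = 'g' ∨ lc = 'q' then stringConcat (tdA newList) lastChar ++ stringConcat (tdA newList) '9'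
    else stringConcat (tdA newList) lastChar
termination_by cs.length
decreasing_by all_goals (simp [List.length_dropLast]; exact List.length_pos_iff.mpr h)

def transform_digits (str : String) : List String := tdA str.toList

-- ===== PORT B =====
def subsDigits (c : Char) : List Char :=  -- SUBS.get(ch.lower(), "")
  if c = 'o' then ['0'] else if c = 'z' then ['2'] else if c = 'a' then ['4']
  else if c = 'b' then ['6', '8'] else if c = 'i' then ['1'] else if c = 'l' then ['1']
  else if c = 'e' then ['3'] else if c = 's' then ['5'] else if c = 't' then ['7']
  else if c = 'g' then ['9'] else if c = 'q' then ['9'] else []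

def stepB (results : List String) (ch : Char) : List String :=
  (ch :: subsDigits (PySem.Chars.lowerChar ch)).flatMap (fun o => results.map (fun p => p.push o))

def transform_digits_alt (str : String) : List String := str.toList.foldl stepB [""]

-- ===== PRECONDITION & SPEC =====
def Spec_transform_digits (str : String) (out : List String) : Prop := out = transform_digits_alt str
instance (str : String) (out : List String) : Decidable (Spec_transform_digits str out) := by unfold Spec_transform_digits; infer_instance

-- ===== CLAIM (what is proved, stated in full; the proofs are below) =====
def Claim_equal_transform_digits : Prop := ∀ (str : String), Dom_transform_digits str → Spec_transform_digits str (transform_digits str)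

-- ===== LEMMAS AND PROOFS =====

set_option maxHeartbeats 2000000 in
lemma tdA_concat (init : List Char) (c : Char) : tdA (init ++ [c]) = stepB (tdA init) c := by
  rw [tdA]
  simp only [List.append_ne_nil_of_right_ne_nil _ (by simp : ([c] : List Char) ≠ []), dite_false,
    List.getLast_concat, List.dropLast_concat, stepB, stringConcat]
  by_cases h : PySem.Chars.lowerChar c = 'i'
  · simp [h, subsDigits, List.flatMap]
  by_cases h2 : PySem.Chars.lowerChar c = 'l'
  · simp [h2, subsDigits, List.flatMap]
  by_cases h3 : PySem.Chars.lowerChar c = 'g'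
  · simp [h3, subsDigits, List.flatMap]
  by_cases h4 : PySem.Chars.lowerChar c = 'q'
  · simp [h4, subsDigits, List.flatMap]
  split_ifs <;> simp_all [subsDigits, List.flatMap]

lemma tdA_eq_foldl (cs : List Char) : tdA cs = cs.foldl stepB [""] := by
  induction cs using List.reverseRecOn with
  | nil => rw [tdA]; rfl
  | append_singleton init c ih => rw [tdA_concat, List.foldl_append, ih]; rfl

-- ===== VERDICT (by name: the statement is the Claim_ definition above) =====
theorem transform_digits_spec : Claim_equal_transform_digits := by
  intro str _
  unfold Spec_transform_digits transform_digits transform_digits_alt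
  exact tdA_eq_foldl str.toList
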